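-- pv_equiv track=rewrite | github.com/javelezz1/Programming-course | uniprot_processer/db_extractor.py | table_names
-- ===== SOURCE A (Python) =====
-- def table_names(record):
--     ID = ""
--     DE = ""
--     for line in record:
--         if line.startswith("ID"):
--             ID = (line[5:].split(" ")[0])
--     elemento = ""
--     contador = 0
--     TABLENAMES = []
--     for line in record:
--         if not line[5:].startswith("  ") and line.startswith("DE"):
--             if not contador == 0:
--                 TABLENAMES.append([ID, elemento])
--             elemento = line[5:]
--             contador = 1
--         elif line[5:].startswith(" ") and line.startswith("DE"):
--             elemento += line[8:]
--     TABLENAMES.append([ID, elemento])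
--     return TABLENAMES
-- ===== SOURCE B (Python) =====
-- def table_names(record):
--     # Single pass: track ID and accumulate bare element strings in a list,
--     # then pair every element with the final ID at the end.
--     ID = ""
--     elements = [""]
--     seen = False
--     for line in record:
--         if line.startswith("ID"):
--             ID = line[5:].split(" ")[0]
--         elif line.startswith("DE"):
--             tail = line[5:]
--             if tail.startswith("  "):
--                 elements[-1] += line[8:]
--             elif seen:
--                 elements.append(tail)
--             else:
--                 elements[-1] = tail
--                 seen = True
--     return [[ID, e] for e in elements]
-- ===== Notes on version B (the rewrite author's own statement) =====
-- stated objective: simpler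
-- what changed: One pass instead of two: B tracks the ID and collects the bare element strings in a list (extending its last entry for continuation lines), then pairs every element with the final ID at the end, replacing A's separate ID pass and per-append contador bookkeeping.
import Mathlib
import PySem

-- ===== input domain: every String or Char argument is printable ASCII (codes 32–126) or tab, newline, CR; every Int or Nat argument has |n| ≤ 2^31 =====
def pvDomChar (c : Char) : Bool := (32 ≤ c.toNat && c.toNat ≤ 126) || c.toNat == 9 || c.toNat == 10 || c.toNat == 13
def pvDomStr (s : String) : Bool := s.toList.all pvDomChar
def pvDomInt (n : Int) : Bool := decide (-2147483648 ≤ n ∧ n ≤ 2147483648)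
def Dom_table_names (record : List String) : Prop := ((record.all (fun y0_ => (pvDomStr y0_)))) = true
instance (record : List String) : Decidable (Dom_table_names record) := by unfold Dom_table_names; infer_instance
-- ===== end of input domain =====

-- B makes a single pass collecting the bare element strings (the ID tracked alongside) and pairs
-- each element with the final ID at the end, instead of A's two passes with per-append bookkeeping.

-- line[5:].split(" ")[0] — split with a nonempty separator always returns a nonempty list, so [0] is its head (exact)
def pvIdOf (line : String) : String :=
  ((PySem.Str.split? (PySem.Str.slice line (some 5) none) " ").getD []).headD ""

-- ===== PORT A =====
-- first loop: ID = last "ID" line's name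
def pvStepID (ID : String) (line : String) : String :=
  if PySem.Str.startswith line "ID" then pvIdOf line else ID

-- second loop body; state = (elemento, contador, TABLENAMES)
def pvStepA (ID : String) (st : String × Int × List (List String)) (line : String) :
    String × Int × List (List String) :=
  if !PySem.Str.startswith (PySem.Str.slice line (some 5) none) "  " &&
      PySem.Str.startswith line "DE" then
    (PySem.Str.slice line (some 5) none, 1,
      if st.2.1 == 0 then st.2.2 else st.2.2 ++ [[ID, st.1]])
  else if PySem.Str.startswith (PySem.Str.slice line (some 5) none) " " &&
      PySem.Str.startswith line "DE" then
    (st.1 ++ PySem.Str.slice line (some 8) none, st.2.1, st.2.2)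
  else st

def table_names (record : List String) : List (List String) :=
  let ID := record.foldl pvStepID ""
  let st := record.foldl (pvStepA ID) ("", 0, [])
  st.2.2 ++ [[ID, st.1]]

-- ===== PORT B =====
-- loop body; state = (ID, elements, seen); elements[-1] access/update via pyGetD/pySetD at -1
def pvStepB (st : String × List String × Bool) (line : String) : String × List String × Bool :=
  if PySem.Str.startswith line "ID" then
    (pvIdOf line, st.2.1, st.2.2)
  else if PySem.Str.startswith line "DE" then
    let tail := PySem.Str.slice line (some 5) none
    if PySem.Str.startswith tail "  " then
      (st.1,
        PySem.List.pySetD st.2.1 (-1)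
          (PySem.List.pyGetD st.2.1 (-1) "" ++ PySem.Str.slice line (some 8) none),
        st.2.2)
    else if st.2.2 then
      (st.1, st.2.1 ++ [tail], true)
    else
      (st.1, PySem.List.pySetD st.2.1 (-1) tail, true)
  else st

def table_names_alt (record : List String) : List (List String) :=
  let st := record.foldl pvStepB ("", [""], false)
  st.2.1.map (fun e => [st.1, e])

-- ===== PRECONDITION & SPEC =====
def Spec_table_names (record : List String) (out : List (List String)) : Prop := out = table_names_alt record
instance (record : List String) (out : List (List String)) : Decidable (Spec_table_names record out) := by unfold Spec_table_names; infer_instance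

-- ===== CLAIM (what is proved, stated in full; the proofs are below) =====
def Claim_equal_table_names : Prop := ∀ (record : List String), Dom_table_names record → Spec_table_names record (table_names record)

-- ===== LEMMAS AND PROOFS =====

theorem pv_id_not_de (line : String) (h : PySem.Str.startswith line "ID" = true) :
    PySem.Str.startswith line "DE" = false := by
  simp only [PySem.Str.startswith_eq] at *
  rw [PySem.Chars.startswith_iff] at h
  rw [Bool.eq_false_iff, Ne, PySem.Chars.startswith_iff]
  intro h2
  obtain ⟨t, ht⟩ := h
  obtain ⟨t2, ht2⟩ := h2
  rw [← ht] at ht2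
  have hde : "DE".toList = ['D', 'E'] := by decide
  have hid : "ID".toList = ['I', 'D'] := by decide
  rw [hde, hid] at ht2
  simp at ht2

theorem pv_two_sp_one_sp (s : String) (h : PySem.Str.startswith s "  " = true) :
    PySem.Str.startswith s " " = true := by
  simp only [PySem.Str.startswith_eq] at *
  rw [PySem.Chars.startswith_iff] at h ⊢
  have h1 : " ".toList <+: "  ".toList := by decide
  exact h1.trans h

theorem pv_setD_last (es : List String) (e v : String) :
    PySem.List.pySetD (es ++ [e]) (-1) v = es ++ [v] := by
  simp [PySem.List.pySetD, PySem.List.pySet?, PySem.List.pyIdx?]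

theorem pvStepB_fst (st : String × List String × Bool) (line : String) :
    (pvStepB st line).1 = pvStepID st.1 line := by
  by_cases hID : PySem.Str.startswith line "ID" = true <;>
    by_cases hDE : PySem.Str.startswith line "DE" = true <;>
      by_cases hsp : PySem.Str.startswith (PySem.Str.slice line (some 5) none) "  " = true <;>
        cases hseen : st.2.2 <;>
          simp only [pvStepB, pvStepID, hID, hDE, hsp, hseen, Bool.false_eq_true,
            if_true, if_false]

theorem pvL1 (record : List String) (id0 : String) (els : List String) (seen : Bool) :
    (record.foldl pvStepB (id0, els, seen)).1 = record.foldl pvStepID id0 := by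
  induction record generalizing id0 els seen with
  | nil => rfl
  | cons line rest ih =>
    rcases hab : pvStepB (id0, els, seen) line with ⟨a, b, c⟩
    have hfst : a = pvStepID id0 line := by
      have := pvStepB_fst (id0, els, seen) line
      rw [hab] at this
      exact this
    rw [List.foldl_cons, List.foldl_cons, hab, ih a b c, hfst]

theorem pvMain (record : List String) (ID elemento : String) (contador : Int)
    (es : List String) (idb : String) (seen : Bool)
    (h1 : seen = false → contador = 0 ∧ es = [])
    (h2 : contador = 0 → seen = false) :
    (record.foldl (pvStepA ID) (elemento, contador, es.map (fun e => [ID, e]))).2.2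
      ++ [[ID, (record.foldl (pvStepA ID) (elemento, contador, es.map (fun e => [ID, e]))).1]]
    = ((record.foldl pvStepB (idb, es ++ [elemento], seen)).2.1).map (fun e => [ID, e]) := by
  induction record generalizing elemento contador es idb seen with
  | nil => simp
  | cons line rest ih =>
    rw [List.foldl_cons, List.foldl_cons]
    by_cases hID : PySem.Str.startswith line "ID" = true
    · have hDE := pv_id_not_de line hID
      simp only [pvStepA, pvStepB, hID, hDE, Bool.and_false, if_true,
        Bool.false_eq_true, if_false]
      exact ih elemento contador es (pvIdOf line) seen h1 h2
    · by_cases hDE : PySem.Str.startswith line "DE" = true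
      · by_cases hsp : PySem.Str.startswith (PySem.Str.slice line (some 5) none) "  " = true
        · -- continuation line: elemento += line[8:]
          have hsp1 := pv_two_sp_one_sp _ hsp
          simp only [pvStepA, pvStepB, hID, hDE, hsp, hsp1, Bool.not_true,
            Bool.and_true, if_false, if_true, Bool.false_eq_true,
            PySem.List.pyGetD_neg_one_append_singleton, pv_setD_last]
          exact ih (elemento ++ PySem.Str.slice line (some 8) none) contador es idb seen h1 h2
        · -- header line: new element
          by_cases hc : contador = 0
          · have hseen := h2 hc
            have hes := (h1 hseen).2
            subst hc hseen hes
            simp only [pvStepA, pvStepB, hID, hDE, hsp, Bool.not_false,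
              Bool.and_true, if_true, Bool.false_eq_true, if_false, beq_self_eq_true,
              List.map_nil, List.nil_append]
            have h := ih (PySem.Str.slice line (some 5) none) 1 [] idb true
              (by simp) (by omega)
            simpa using h
          · have hseen : seen = true := by
              cases seen with
              | false => exact absurd (h1 rfl).1 hc
              | true => rfl
            subst hseen
            have hcb : (contador == 0) = false := by simpa using hc
            simp only [pvStepA, pvStepB, hID, hDE, hsp, hcb, Bool.not_false,
              Bool.and_true, if_true, Bool.false_eq_true, if_false]
            have h := ih (PySem.Str.slice line (some 5) none) 1 (es ++ [elemento]) idb true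
              (by simp) (by omega)
            simpa using h
      · -- neither ID nor DE: both steps leave the state unchanged
        simp only [pvStepA, pvStepB, hID, hDE, Bool.and_false, if_false, Bool.false_eq_true]
        exact ih elemento contador es idb seen h1 h2

-- ===== VERDICT (by name: the statement is the Claim_ definition above) =====
theorem table_names_spec : Claim_equal_table_names := by
  intro record _
  show table_names record = table_names_alt record
  have hid := pvL1 record "" [""] false
  have h := pvMain record (record.foldl pvStepID "") "" 0 [] "" false
    (by simp) (by simp)
  simp only [List.map_nil, List.nil_append] at h
  have e1 : table_names record
      = (record.foldl (pvStepA (record.foldl pvStepID "")) ("", 0, [])).2.2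
        ++ [[record.foldl pvStepID "",
             (record.foldl (pvStepA (record.foldl pvStepID "")) ("", 0, [])).1]] := rfl
  have e2 : table_names_alt record
      = ((record.foldl pvStepB ("", [""], false)).2.1).map
          (fun e => [(record.foldl pvStepB ("", [""], false)).1, e]) := rfl
  rw [e1, e2, hid, h]
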